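-- pv_equiv track=rewrite | github.com/mitochondrion/cbh | bio.py | numberToPatternIter
-- ===== SOURCE A (Python) =====
-- numberToSymbol = ["A", "C", "G", "T"]
--
-- def numberToPatternIter(number, length):
--   if number == 0: return "A"
--
--   pattern = ""
--   quotient = 1
--   remainder = 0
--
--   while number is not 0:
--     remainder = number % 4
--     number = number // 4
--     pattern = numberToSymbol[remainder] + pattern
--
--   padding = 'A' * (length - len(pattern))
--   return padding + pattern
-- ===== SOURCE B (Python) =====
-- numberToSymbol = ["A", "C", "G", "T"]
--
-- def numberToPatternIter(number, length):
--   if number == 0: return "A"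
--
--   def helper(n):
--     return "" if n == 0 else helper(n // 4) + numberToSymbol[n % 4]
--
--   pattern = helper(number)
--   padding = 'A' * (length - len(pattern))
--   return padding + pattern
-- ===== Notes on version B (the rewrite author's own statement) =====
-- stated objective: alternative
-- what changed: Replaces the while-loop that prepends digits to a mutable accumulator with a recursive helper that builds the base-4 string from the quotient outward (helper(n//4) + symbol(n%4)).
import Mathlib
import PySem

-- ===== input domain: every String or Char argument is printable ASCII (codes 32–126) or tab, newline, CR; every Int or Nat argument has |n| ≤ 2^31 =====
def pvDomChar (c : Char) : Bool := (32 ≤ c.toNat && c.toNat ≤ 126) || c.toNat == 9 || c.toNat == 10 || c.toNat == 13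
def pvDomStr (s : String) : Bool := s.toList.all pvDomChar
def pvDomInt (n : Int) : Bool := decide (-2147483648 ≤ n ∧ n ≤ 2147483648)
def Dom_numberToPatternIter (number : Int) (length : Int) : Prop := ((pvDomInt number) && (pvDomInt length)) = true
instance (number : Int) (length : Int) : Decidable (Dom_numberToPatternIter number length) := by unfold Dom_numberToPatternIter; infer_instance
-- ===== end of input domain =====

-- B replaces A's while-loop digit accumulation with a recursive helper over the quotient (alternative decomposition; equivalence is about the return value).

-- ===== PORT A =====
-- numberToSymbol[r] for r = number % 4 (always 0..3)
def pvSymbol (r : Int) : String :=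
  if r = 0 then "A" else if r = 1 then "C" else if r = 2 then "G" else "T"

-- the while-loop; fuel makes it total (the Python loop diverges for number < 0, excluded by Pre_;
-- within Dom a nonnegative number needs at most 16 iterations, so fuel 64 never cuts the loop short)
def pvLoopA (fuel : Nat) (number : Int) (pattern : String) : String :=
  match fuel with
  | 0 => pattern
  | f + 1 =>
    if number = 0 then pattern
    else
      pvLoopA f (PySem.Int.floordiv number 4) (pvSymbol (PySem.Int.mod number 4) ++ pattern)

def numberToPatternIter (number : Int) (length : Int) : String :=
  if number = 0 then "A"
  else
    let pattern := pvLoopA 64 number ""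
    let padding := String.ofList (List.replicate (length - (pattern.length : Int)).toNat 'A')
    padding ++ pattern

-- ===== PORT B =====
-- helper(n) = "" if n == 0 else helper(n // 4) + numberToSymbol[n % 4]  (for n ≥ 0; recursion on the quotient)
def pvHelperB (n : Nat) : String :=
  if n = 0 then "" else pvHelperB (n / 4) ++ pvSymbol ((n % 4 : Nat) : Int)
decreasing_by exact Nat.div_lt_self (Nat.pos_of_ne_zero (by assumption)) (by omega)

def numberToPatternIter_alt (number : Int) (length : Int) : String :=
  if number = 0 then "A"
  else
    let pattern := pvHelperB number.toNat
    let padding := String.ofList (List.replicate (length - (pattern.length : Int)).toNat 'A')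
    padding ++ pattern

-- ===== PRECONDITION & SPEC =====
-- Pre_ excludes negative number, on which Python A's while-loop never terminates (number // 4 stays -1).
def Pre_numberToPatternIter (number : Int) (_length : Int) : Prop := 0 ≤ number
instance (number : Int) (length : Int) : Decidable (Pre_numberToPatternIter number length) := by unfold Pre_numberToPatternIter; infer_instance
def pvWitness_numberToPatternIter : Int × Int := (11, 5)

def Spec_numberToPatternIter (number : Int) (length : Int) (out : String) : Prop := out = numberToPatternIter_alt number length
instance (number : Int) (length : Int) (out : String) : Decidable (Spec_numberToPatternIter number length out) := by unfold Spec_numberToPatternIter; infer_instance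

-- ===== CLAIM (what is proved, stated in full; the proofs are below) =====
def Claim_equal_numberToPatternIter : Prop := ∀ (number : Int) (length : Int), Dom_numberToPatternIter number length → Pre_numberToPatternIter number length → Spec_numberToPatternIter number length (numberToPatternIter number length)

-- ===== LEMMAS AND PROOFS =====

-- with enough fuel, the loop prepends exactly B's recursive string
theorem pvLoop_eq_helper (fuel : Nat) : ∀ (n : Nat) (p : String), n < 4 ^ fuel →
    pvLoopA fuel (n : Int) p = pvHelperB n ++ p := by
  induction fuel with
  | zero =>
    intro n p h
    interval_cases n
    simp [pvLoopA, pvHelperB]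
  | succ f ih =>
    intro n p h
    by_cases hn : n = 0
    · subst hn; simp [pvLoopA, pvHelperB]
    · rw [pvLoopA]
      rw [if_neg (by exact_mod_cast hn)]
      have hd : PySem.Int.floordiv (n : Int) 4 = ((n / 4 : Nat) : Int) := by
        exact_mod_cast PySem.Int.floordiv_natCast n 4
      have hm : PySem.Int.mod (n : Int) 4 = ((n % 4 : Nat) : Int) := by
        exact_mod_cast PySem.Int.mod_natCast n 4
      rw [hd, hm, ih (n / 4) _ (by
        have : n < 4 * 4 ^ f := by simpa [pow_succ, mul_comm] using h
        omega)]
      conv_rhs => rw [pvHelperB, if_neg hn]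
      simp [String.append_assoc]

theorem numberToPatternIter_spec : Claim_equal_numberToPatternIter := by
  intro number length hDom hPre
  unfold Spec_numberToPatternIter numberToPatternIter numberToPatternIter_alt
  by_cases h0 : number = 0
  · simp [h0]
  · rw [if_neg h0, if_neg h0]
    have hn : number = (number.toNat : Int) := by
      unfold Pre_numberToPatternIter at hPre; omega
    have hb : number.toNat < 4 ^ 64 := by
      unfold Dom_numberToPatternIter at hDom
      simp [pvDomInt] at hDom
      have h1 : number ≤ 2147483648 := hDom.1.2
      have : number.toNat ≤ 2147483648 := by omega
      calc number.toNat ≤ 2147483648 := this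
        _ < 4 ^ 64 := by norm_num
    have := pvLoop_eq_helper 64 number.toNat "" hb
    have hmax : max number 0 = number :=
      max_eq_left (by unfold Pre_numberToPatternIter at hPre; omega)
    rw [hn, this]
    simp [hmax]
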